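-- pv_equiv track=rewrite | github.com/Azure-Samples/azureai-assistant-tool | sdk/azure-ai-assistant/azure/ai/assistant/management/function_config_manager.py | _find_function_start_end_lines
-- ===== SOURCE A (Python) =====
-- def _find_function_start_end_lines(lines, function_name):
--     start_line = None
--     end_line = None
--     tag = f"# User function: {function_name}"
--     for i, line in enumerate(lines):
--         if line.strip() == tag:
--             start_line = i
--             for j in range(i + 1, len(lines)):
--                 if lines[j].strip().startswith("# User function:") and j != i:
--                     end_line = j
--                     break
--             if end_line is None:
--                 end_line = len(lines)
--             break
--     return start_line, end_line
-- ===== SOURCE B (Python) =====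
-- def _find_function_start_end_lines(lines, function_name):
--     tag = f"# User function: {function_name}"
--     # one pass builds the table of all marker lines (index, stripped text)
--     markers = []
--     for i, ln in enumerate(lines):
--         s = ln.strip()
--         if s.startswith("# User function:"):
--             markers.append((i, s))
--     # find the tagged marker; the end is simply the next marker (or len(lines))
--     for k, (m, s) in enumerate(markers):
--         if s == tag:
--             end = markers[k + 1][0] if k + 1 < len(markers) else len(lines)
--             return m, end
--     return None, None
-- ===== Notes on version B (the rewrite author's own statement) =====
-- stated objective: simpler
-- what changed: B builds the list of all marker lines (index, stripped text) in one pass and reads start/end directly off that table, replacing A's nested forward re-scan for the next marker.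
import Mathlib
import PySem

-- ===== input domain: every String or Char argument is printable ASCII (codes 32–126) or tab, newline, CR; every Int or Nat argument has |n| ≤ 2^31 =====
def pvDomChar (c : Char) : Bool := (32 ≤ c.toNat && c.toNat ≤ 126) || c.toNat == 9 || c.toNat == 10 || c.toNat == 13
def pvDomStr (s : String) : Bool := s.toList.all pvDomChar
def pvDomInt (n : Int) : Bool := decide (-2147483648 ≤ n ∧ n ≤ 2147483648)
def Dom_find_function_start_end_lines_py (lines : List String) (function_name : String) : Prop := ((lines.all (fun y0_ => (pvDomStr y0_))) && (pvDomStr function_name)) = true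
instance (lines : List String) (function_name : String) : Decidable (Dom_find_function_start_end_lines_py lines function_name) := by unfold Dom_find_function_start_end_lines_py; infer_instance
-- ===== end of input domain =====

-- B replaces A's nested forward re-scan by a precomputed table of marker lines; objective: simpler.

-- ===== PORT A =====
-- inner loop: 'for j in range(i+1, len(lines))' scanning the suffix after the hit
def pvAInner (rest : List String) (j : Int) : Option Int :=
  match rest with
  | [] => none
  | l :: ls =>
    if PySem.Str.startswith (PySem.Str.strip l) "# User function:" then some j
    else pvAInner ls (j + 1)

-- outer loop: 'for i, line in enumerate(lines)'
def pvAOuter (rest : List String) (i : Int) (tag : String) (total : Int) :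
    Option Int × Option Int :=
  match rest with
  | [] => (none, none)
  | l :: ls =>
    if PySem.Str.strip l = tag then
      (some i, some ((pvAInner ls (i + 1)).getD total))
    else pvAOuter ls (i + 1) tag total

def find_function_start_end_lines_py (lines : List String) (function_name : String) : Option Int × Option Int :=
  pvAOuter lines 0 ("# User function: " ++ function_name) (lines.length : Int)

-- ===== PORT B =====
-- table of all marker lines: (index, stripped text)
def pvBMarkers (lines : List String) : List (Int × String) :=
  (PySem.List.enumerate lines).filterMap (fun p =>
    if PySem.Str.startswith (PySem.Str.strip p.2) "# User function:" then
      some (p.1, PySem.Str.strip p.2)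
    else none)

-- scan the marker table; the end is the next marker's index (or len(lines))
def pvBScan (markers : List (Int × String)) (tag : String) (total : Int) :
    Option Int × Option Int :=
  match markers with
  | [] => (none, none)
  | (m, s) :: rest =>
    if s = tag then
      (some m, some (match rest with | [] => total | (m2, _) :: _ => m2))
    else pvBScan rest tag total

def find_function_start_end_lines_py_alt (lines : List String) (function_name : String) : Option Int × Option Int :=
  pvBScan (pvBMarkers lines) ("# User function: " ++ function_name) (lines.length : Int)

-- ===== PRECONDITION & SPEC =====
def Spec_find_function_start_end_lines_py (lines : List String) (function_name : String) (out : Option Int × Option Int) : Prop := out = find_function_start_end_lines_py_alt lines function_name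
instance (lines : List String) (function_name : String) (out : Option Int × Option Int) : Decidable (Spec_find_function_start_end_lines_py lines function_name out) := by unfold Spec_find_function_start_end_lines_py; infer_instance

-- ===== CLAIM (what is proved, stated in full; the proofs are below) =====
def Claim_equal_find_function_start_end_lines_py : Prop := ∀ (lines : List String) (function_name : String), Dom_find_function_start_end_lines_py lines function_name → Spec_find_function_start_end_lines_py lines function_name (find_function_start_end_lines_py lines function_name)

-- ===== LEMMAS AND PROOFS =====

-- the marker table of a suffix, with indices starting at i
def pvMk (ls : List String) (i : Int) : List (Int × String) :=
  (PySem.List.enumerate ls i).filterMap (fun p =>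
    if PySem.Str.startswith (PySem.Str.strip p.2) "# User function:" then
      some (p.1, PySem.Str.strip p.2)
    else none)

theorem pvMk_cons (l : String) (ls : List String) (i : Int) :
    pvMk (l :: ls) i =
      (if PySem.Str.startswith (PySem.Str.strip l) "# User function:" then
        [(i, PySem.Str.strip l)] else []) ++ pvMk ls (i + 1) := by
  simp only [pvMk, PySem.List.enumerate_cons, List.filterMap_cons]
  split_ifs <;> simp

theorem pvAInner_eq (ls : List String) (j : Int) :
    pvAInner ls j = (match pvMk ls j with | [] => none | (m, _) :: _ => some m) := by
  induction ls generalizing j with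
  | nil => simp [pvAInner, pvMk]
  | cons l ls ih =>
    rw [pvAInner, pvMk_cons]
    split_ifs with h <;> simp [ih]

theorem pv_tag_starts (fn : String) :
    PySem.Str.startswith ("# User function: " ++ fn) "# User function:" = true := by
  simp only [PySem.Str.startswith_eq]
  refine (PySem.Chars.startswith_iff _ _).mpr ?_
  refine ⟨' ' :: fn.toList, ?_⟩
  simp [String.toList_append]

theorem pvAOuter_eq (ls : List String) (i : Int) (tag : String) (total : Int)
    (htag : PySem.Str.startswith tag "# User function:" = true) :
    pvAOuter ls i tag total = pvBScan (pvMk ls i) tag total := by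
  induction ls generalizing i with
  | nil => simp [pvAOuter, pvMk, pvBScan]
  | cons l ls ih =>
    rw [pvAOuter, pvMk_cons]
    by_cases h : PySem.Str.strip l = tag
    · have hs : PySem.Str.startswith (PySem.Str.strip l) "# User function:" = true := by
        rw [h]; exact htag
      rw [if_pos h, if_pos hs]
      simp only [List.singleton_append, pvBScan, if_pos h]
      rw [pvAInner_eq]
      cases hmk : pvMk ls (i + 1) with
      | nil => simp
      | cons p rest => cases p; simp
    · rw [if_neg h]
      split_ifs with hs
      · simp only [List.singleton_append, pvBScan, if_neg h]; exact ih (i + 1)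
      · simpa using ih (i + 1)

-- ===== VERDICT (by name: the statement is the Claim_ definition above) =====
theorem find_function_start_end_lines_py_spec : Claim_equal_find_function_start_end_lines_py := by
  intro lines fn _
  unfold Spec_find_function_start_end_lines_py find_function_start_end_lines_py
    find_function_start_end_lines_py_alt
  have : pvBMarkers lines = pvMk lines 0 := rfl
  rw [this, pvAOuter_eq _ _ _ _ (pv_tag_starts fn)]
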